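-- pv_equiv track=rewrite | github.com/debdattasarkar/DSA | 2. GFG/0. All/5. Data Structure/(H) Number of BST From Array/py_sol.py | countBSTs
-- ===== SOURCE A (Python) =====
-- def countBSTs(arr):
--     """
--     Strategy:
--       1) Sort to get rank of each value -> L (#smaller), R (#greater).
--       2) Precompute Catalan numbers up to n.
--       3) Answer[i] = C[L] * C[R].
--
--     Time  : O(n log n) for sort + O(n^2) for Catalan DP (or O(n) if using direct formula w/ big ints)
--     Space : O(n)
--     """
--     n = len(arr)
--     if n == 0:
--         return []
--
--     # 1) ranks
--     sorted_vals = sorted(arr)                                 # O(n log n)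
--     rank = {v: i for i, v in enumerate(sorted_vals)}          # O(n)
--
--     # 2) Catalan numbers up to n
--     C = [0] * (n + 1)
--     C[0] = 1
--     for k in range(1, n + 1):                                 # O(n^2)
--         total = 0
--         # Ck = sum_{i=0..k-1} (Ci * C_{k-1-i})
--         for i in range(k):
--             total += C[i] * C[k - 1 - i]
--         C[k] = total
--
--     # 3) compute answers
--     ans = []
--     for x in arr:                                             # O(n)
--         L = rank[x]
--         R = n - 1 - L
--         ans.append(C[L] * C[R])
--     return ans
-- ===== SOURCE B (Python) =====
-- def countBSTs(arr):
--     n = len(arr)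
--     # Catalan numbers via the multiplicative recurrence (no convolution DP)
--     C = [1]
--     for k in range(1, n + 1):
--         C.append(C[k - 1] * 2 * (2 * k - 1) // (k + 1))
--     # rank of x = (#elements <= x) - 1, counted directly (no sort, no dict)
--     out = []
--     for x in arr:
--         L = sum(1 for y in arr if y <= x) - 1
--         out.append(C[L] * C[n - 1 - L])
--     return out
-- ===== Notes on version B (the rewrite author's own statement) =====
-- stated objective: faster
-- what changed: B drops A's sort-and-rank-dict and O(n^2) convolution Catalan DP: ranks come from directly counting elements <= x, and Catalan numbers from the multiplicative recurrence C[k] = C[k-1]*2*(2k-1)//(k+1).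
import Mathlib
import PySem

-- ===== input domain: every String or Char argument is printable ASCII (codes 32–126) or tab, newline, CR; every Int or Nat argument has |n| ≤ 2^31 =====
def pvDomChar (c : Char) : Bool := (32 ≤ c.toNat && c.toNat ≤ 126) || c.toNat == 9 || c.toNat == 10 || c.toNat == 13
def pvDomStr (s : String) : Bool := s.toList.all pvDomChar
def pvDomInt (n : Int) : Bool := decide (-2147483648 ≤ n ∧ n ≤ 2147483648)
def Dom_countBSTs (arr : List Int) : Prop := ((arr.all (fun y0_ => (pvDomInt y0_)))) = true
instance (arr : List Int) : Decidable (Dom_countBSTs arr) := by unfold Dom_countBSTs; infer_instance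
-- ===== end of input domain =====

-- B replaces A's sort+rank-dict and O(n^2) convolution Catalan DP by direct "count of elements ≤ x"
-- ranks and the multiplicative Catalan recurrence C[k] = C[k-1]*2*(2k-1)//(k+1).

-- ===== PORT A =====
-- one step of A's Catalan DP: C[k] = sum_{i<k} C[i]*C[k-1-i]
def stepA (C : List Int) (k : Int) : List Int :=
  let total := (PySem.List.pyRange 0 k).foldl
    (fun t i => t + PySem.List.pyGetD C i 0 * PySem.List.pyGetD C (k - 1 - i) 0) 0
  C.set k.toNat total

def countBSTs (arr : List Int) : List Int :=
  let n : Int := (arr.length : Int)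
  if arr.length = 0 then []
  else
    let sorted_vals := PySem.List.sorted arr (fun v => v) false
    let rank : PySem.Dict Int Int :=
      (PySem.List.enumerate sorted_vals 0).foldl (fun d p => d.insert p.2 p.1) PySem.Dict.empty
    let C : List Int :=
      (PySem.List.pyRange 1 (n + 1)).foldl stepA ((List.replicate (arr.length + 1) 0).set 0 1)
    arr.foldl (fun ans x =>
      let L := rank.getD x 0
      let R := n - 1 - L
      ans ++ [PySem.List.pyGetD C L 0 * PySem.List.pyGetD C R 0]) []

-- ===== PORT B =====
-- one step of B's Catalan recurrence: C.append(C[k-1]*2*(2k-1) // (k+1))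
def stepB (C : List Int) (k : Int) : List Int :=
  C ++ [PySem.Int.floordiv (PySem.List.pyGetD C (k - 1) 0 * 2 * (2 * k - 1)) (k + 1)]

def countBSTs_alt (arr : List Int) : List Int :=
  let n : Int := (arr.length : Int)
  let C : List Int := (PySem.List.pyRange 1 (n + 1)).foldl stepB [1]
  arr.foldl (fun out x =>
    let L := arr.foldl (fun t y => if y ≤ x then t + 1 else t) (0 : Int) - 1
    out ++ [PySem.List.pyGetD C L 0 * PySem.List.pyGetD C (n - 1 - L) 0]) []

-- ===== PRECONDITION & SPEC =====
def Spec_countBSTs (arr : List Int) (out : List Int) : Prop := out = countBSTs_alt arr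
instance (arr : List Int) (out : List Int) : Decidable (Spec_countBSTs arr out) := by unfold Spec_countBSTs; infer_instance

-- ===== CLAIM (what is proved, stated in full; the proofs are below) =====
def Claim_equal_countBSTs : Prop := ∀ (arr : List Int), Dom_countBSTs arr → Spec_countBSTs arr (countBSTs arr)

-- ===== LEMMAS AND PROOFS =====

-- the prefix [catalan 0, …, catalan m] as integers
def catPre (m : Nat) : List Int := (List.range (m + 1)).map (fun j => (catalan j : Int))

theorem catPre_getD (m j : Nat) (hj : j ≤ m) (rest : List Int) :
    PySem.List.pyGetD (catPre m ++ rest) (j : Int) 0 = (catalan j : Int) := by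
  rw [PySem.List.pyGetD_natCast]
  rw [List.getD_append _ _ _ _ (by simp [catPre]; omega)]
  exact PySem.List.getD_map_range _ _ _ _ (by omega)

theorem catPre_succ (m : Nat) : catPre (m + 1) = catPre m ++ [(catalan (m + 1) : Int)] := by
  simp [catPre, List.range_succ]

theorem list_sum_range (f : Nat → Nat) (n : Nat) :
    ((List.range n).map f).sum = ∑ i ∈ Finset.range n, f i := by
  induction n with
  | zero => simp
  | succ n ih => simp [List.range_succ, Finset.sum_range_succ, ih]

theorem catalan_conv (m : Nat) :
    ∑ i ∈ Finset.range (m + 1), catalan i * catalan (m - i) = catalan (m + 1) := by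
  rw [catalan_succ]
  exact (Fin.sum_univ_eq_sum_range (fun i => catalan i * catalan (m - i)) (m + 1)).symm

-- (m+2) * catalan (m+1) = catalan m * 2 * (2m+1), over ℤ
theorem cat_rec (m : Nat) :
    ((m : Int) + 2) * (catalan (m + 1) : Int) = (catalan m : Int) * 2 * (2 * (m : Int) + 1) := by
  have h1 := congrArg (fun k : Nat => (k : Int)) (succ_mul_catalan_eq_centralBinom (m + 1))
  have h2 := congrArg (fun k : Nat => (k : Int)) (Nat.succ_mul_centralBinom_succ m)
  have h3 := congrArg (fun k : Nat => (k : Int)) (succ_mul_catalan_eq_centralBinom m)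
  push_cast at h1 h2 h3
  have hd : ((m : Int) + 1) * (((m + 1).centralBinom : Int))
      = ((m : Int) + 1) * ((catalan m : Int) * 2 * (2 * (m : Int) + 1)) := by
    rw [h2, ← h3]; ring
  have hcb : (((m + 1).centralBinom : Int)) = (catalan m : Int) * 2 * (2 * (m : Int) + 1) :=
    mul_left_cancel₀ (by omega) hd
  ring_nf at h1 ⊢
  ring_nf at hcb
  linarith [h1, hcb]

-- A's inner convolution loop computes catalan (m+1)
theorem totalA (m : Nat) (rest : List Int) :
    (PySem.List.pyRange 0 ((m : Int) + 1)).foldl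
      (fun t i => t + PySem.List.pyGetD (catPre m ++ rest) i 0 *
        PySem.List.pyGetD (catPre m ++ rest) ((m : Int) + 1 - 1 - i) 0) 0
      = (catalan (m + 1) : Int) := by
  have hcast : ((m : Int) + 1) = ((m + 1 : Nat) : Int) := by push_cast; ring
  rw [hcast, PySem.List.pyRange_zero_natCast, List.foldl_map, PySem.List.foldl_add, zero_add]
  have hpt : ∀ j ∈ List.range (m + 1),
      (fun j : Nat => PySem.List.pyGetD (catPre m ++ rest) (j : Int) 0 *
        PySem.List.pyGetD (catPre m ++ rest) (((m + 1 : Nat) : Int) - 1 - (j : Int)) 0) j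
      = (fun j : Nat => ((catalan j * catalan (m - j) : Nat) : Int)) j := by
    intro j hj
    have hjm : j ≤ m := by have := List.mem_range.mp hj; omega
    simp only []
    have hidx : (((m + 1 : Nat) : Int)) - 1 - (j : Int) = ((m - j : Nat) : Int) := by
      rw [Nat.cast_sub hjm]; push_cast; ring
    rw [hidx, catPre_getD m j hjm rest, catPre_getD m (m - j) (by omega) rest]
    push_cast; ring
  have hmap := List.map_congr_left hpt
  rw [hmap]
  have hmm : (List.range (m + 1)).map (fun j : Nat => ((catalan j * catalan (m - j) : Nat) : Int))
      = ((List.range (m + 1)).map (fun j => catalan j * catalan (m - j))).map (fun k : Nat => (k : Int)) := by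
    rw [List.map_map]; rfl
  rw [hmm, ← Nat.cast_list_sum, list_sum_range, catalan_conv]

theorem stepA_eq (n m : Nat) (hm : m < n) :
    stepA (catPre m ++ List.replicate (n - m) 0) ((m : Int) + 1)
      = catPre (m + 1) ++ List.replicate (n - (m + 1)) 0 := by
  unfold stepA
  rw [totalA]
  have hrep : List.replicate (n - m) (0 : Int) = 0 :: List.replicate (n - (m + 1)) 0 := by
    have : n - m = (n - (m + 1)) + 1 := by omega
    rw [this, List.replicate_succ]
  have htn : ((m : Int) + 1).toNat = m + 1 := by omega
  rw [htn, hrep, catPre_succ]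
  rw [List.set_append_right _ _ (by simp [catPre])]
  simp [catPre]

theorem stepB_eq (m : Nat) :
    stepB (catPre m) ((m : Int) + 1) = catPre (m + 1) := by
  unfold stepB
  have h1 : ((m : Int) + 1 - 1) = ((m : Nat) : Int) := by ring
  have h2 : PySem.List.pyGetD (catPre m) ((m : Int) + 1 - 1) 0 = (catalan m : Int) := by
    rw [h1, ← List.append_nil (catPre m)]
    exact catPre_getD m m le_rfl []
  rw [h2]
  have hval : (catalan m : Int) * 2 * (2 * ((m : Int) + 1) - 1) = ((m : Int) + 2) * (catalan (m + 1) : Int) := by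
    linear_combination (-1 : Int) * cat_rec m
  have : PySem.Int.floordiv ((catalan m : Int) * 2 * (2 * ((m : Int) + 1) - 1)) ((m : Int) + 1 + 1)
      = (catalan (m + 1) : Int) := by
    rw [hval]
    show (((m : Int) + 2) * (catalan (m + 1) : Int)).fdiv ((m : Int) + 1 + 1) = _
    rw [show ((m : Int) + 1 + 1) = ((m : Int) + 2) by ring]
    exact Int.mul_fdiv_cancel_left _ (by omega)
  rw [this, catPre_succ]

-- the two Catalan loops, run from step m+1 up to n, both end in catPre n
theorem catA_loop (n : Nat) :
    ∀ d m, m ≤ n → n - m = d →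
      (PySem.List.pyRange ((m : Int) + 1) ((n : Int) + 1)).foldl stepA
        (catPre m ++ List.replicate (n - m) 0) = catPre n := by
  intro d
  induction d with
  | zero =>
    intro m hm hd
    have : m = n := by omega
    subst this
    rw [PySem.List.pyRange_one_eq_nil (by omega)]
    simp
  | succ d ih =>
    intro m hm hd
    have hlt : m < n := by omega
    rw [PySem.List.pyRange_one_cons (by push_cast; omega)]
    rw [List.foldl_cons, stepA_eq n m hlt]
    have hc : ((m : Int) + 1 + 1) = (((m + 1 : Nat) : Int) + 1) := by norm_cast
    rw [hc]
    exact ih (m + 1) (by omega) (by omega)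

theorem catB_loop (n : Nat) :
    ∀ d m, m ≤ n → n - m = d →
      (PySem.List.pyRange ((m : Int) + 1) ((n : Int) + 1)).foldl stepB (catPre m) = catPre n := by
  intro d
  induction d with
  | zero =>
    intro m hm hd
    have : m = n := by omega
    subst this
    rw [PySem.List.pyRange_one_eq_nil (by omega)]
    rfl
  | succ d ih =>
    intro m hm hd
    rw [PySem.List.pyRange_one_cons (by push_cast; omega)]
    rw [List.foldl_cons, stepB_eq m]
    have hc : ((m : Int) + 1 + 1) = (((m + 1 : Nat) : Int) + 1) := by norm_cast
    rw [hc]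
    exact ih (m + 1) (by omega) (by omega)

theorem catPre_zero : catPre 0 = [1] := by simp [catPre]

-- A's rank dict on a sorted list: rank[x] = (#elements ≤ x) - 1
theorem rank_getD (s : List Int) (hs : s.Pairwise (· ≤ ·)) (x : Int) (hx : x ∈ s) :
    ((PySem.List.enumerate s 0).foldl (fun d p => d.insert p.2 p.1)
        (PySem.Dict.empty : PySem.Dict Int Int)).getD x 0
      = (s.countP (fun y => decide (y ≤ x)) : Int) - 1 := by
  induction s using List.reverseRecOn with
  | nil => simp at hx
  | append_singleton s v ih =>
    rw [List.pairwise_append] at hs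
    obtain ⟨hps, -, hall⟩ := hs
    have hle : ∀ y ∈ s, y ≤ v := fun y hy => hall y hy v (by simp)
    rw [PySem.List.enumerate_append, List.foldl_append]
    simp only [PySem.List.enumerate, List.foldl_cons, List.foldl_nil]
    rw [PySem.Dict.getD_insert]
    by_cases hxv : x = v
    · subst hxv
      rw [if_pos rfl]
      rw [List.countP_append]
      have h1 : s.countP (fun y => decide (y ≤ x)) = s.length :=
        List.countP_eq_length.mpr (fun y hy => by simpa using hle y hy)
      simp [h1]
    · rw [if_neg hxv]
      have hxs : x ∈ s := by
        rcases List.mem_append.mp hx with h | h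
        · exact h
        · simp at h; exact absurd h hxv
      rw [ih hps hxs, List.countP_append]
      have : ¬ (v ≤ x) := fun hvx => hxv (le_antisymm (hle x hxs) hvx)
      simp [this]

-- B's counting loop is countP
theorem count_foldl (x : Int) (l : List Int) (t : Int) :
    l.foldl (fun t y => if y ≤ x then t + 1 else t) t
      = t + (l.countP (fun y => decide (y ≤ x)) : Int) := by
  induction l generalizing t with
  | nil => simp
  | cons a l ih =>
    rw [List.foldl_cons, ih, List.countP_cons]
    by_cases h : a ≤ x <;> simp [h] <;> ring

-- appending loops are maps
theorem foldl_push {α β : Type} (f : α → β) (l : List α) (acc : List β) :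
    l.foldl (fun a x => a ++ [f x]) acc = acc ++ l.map f := by
  induction l generalizing acc with
  | nil => simp
  | cons a l ih => simp [ih]

-- ===== VERDICT (by name: the statement is the Claim_ definition above) =====
theorem countBSTs_spec : Claim_equal_countBSTs := by
  intro arr _
  unfold Spec_countBSTs countBSTs countBSTs_alt
  by_cases hnil : arr.length = 0
  · rw [if_pos hnil]
    rw [List.length_eq_zero_iff.mp hnil]
    simp
  · rw [if_neg hnil]
    set n := arr.length with hn
    -- the two Catalan tables are both catPre n
    have hA : (PySem.List.pyRange 1 ((n : Int) + 1)).foldl stepA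
        ((List.replicate (n + 1) 0).set 0 1) = catPre n := by
      have := catA_loop n n 0 (by omega) (by omega)
      simpa [catPre_zero, List.replicate_succ] using this
    have hB : (PySem.List.pyRange 1 ((n : Int) + 1)).foldl stepB [1] = catPre n := by
      have := catB_loop n n 0 (by omega) (by omega)
      simpa [catPre_zero] using this
    simp only [hA, hB]
    rw [foldl_push, foldl_push, List.nil_append, List.nil_append]
    apply List.map_congr_left
    intro x hx
    have hrank :
        ((PySem.List.enumerate (PySem.List.sorted arr (fun v => v) false) 0).foldl
            (fun d p => d.insert p.2 p.1) (PySem.Dict.empty : PySem.Dict Int Int)).getD x 0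
          = (arr.countP (fun y => decide (y ≤ x)) : Int) - 1 := by
      rw [rank_getD _ (by simpa using PySem.List.sorted_pairwise arr (fun v => v)) x
        ((PySem.List.mem_sorted arr (fun v => v) false x).mpr hx)]
      rw [(PySem.List.sorted_perm arr (fun v => v) false).countP_eq]
    rw [hrank, count_foldl]
    simp
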